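-- pv_equiv track=rewrite | github.com/Vaishnavi-bele/DataWhisperer | backend/app/services/query_engine/sql_generator.py | _best_num
-- ===== SOURCE A (Python) =====
-- def _best_num(mentioned, num_cols):
--     for c in mentioned:
--         if c in num_cols:
--             return c
--     for p in ["total_revenue","revenue","sales","profit","amount","price","unit_price","total","value","score","quantity","spending","qty", "units", "sold"]:
--         for c in num_cols:
--             if p in c.lower():
--                 return c
--     return num_cols[0] if num_cols else None
-- ===== SOURCE B (Python) =====
-- _PRIORITY = ["total_revenue","revenue","sales","profit","amount","price","unit_price","total","value","score","quantity","spending","qty", "units", "sold"]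
--
-- def _rank(low):
--     # smallest priority index whose pattern occurs in low, else None
--     for i, p in enumerate(_PRIORITY):
--         if p in low:
--             return i
--     return None
--
-- def _best_num(mentioned, num_cols):
--     present = set(num_cols)
--     for c in mentioned:
--         if c in present:
--             return c
--     best = None  # (column, rank) with strictly minimal rank; first column wins ties
--     for c in num_cols:
--         r = _rank(c.lower())
--         if r is not None and (best is None or r < best[1]):
--             best = (c, r)
--     if best is not None:
--         return best[0]
--     return num_cols[0] if num_cols else None
-- ===== Notes on version B (the rewrite author's own statement) =====
-- stated objective: alternative
-- what changed: Replaced the pattern-outer nested scan (for each priority pattern, rescan all columns) by a single column-major pass that computes each column's minimal matching pattern index and keeps the column of strictly smallest rank (first wins ties); phase 1 tests mention membership against a set of the columns.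
import Mathlib
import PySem

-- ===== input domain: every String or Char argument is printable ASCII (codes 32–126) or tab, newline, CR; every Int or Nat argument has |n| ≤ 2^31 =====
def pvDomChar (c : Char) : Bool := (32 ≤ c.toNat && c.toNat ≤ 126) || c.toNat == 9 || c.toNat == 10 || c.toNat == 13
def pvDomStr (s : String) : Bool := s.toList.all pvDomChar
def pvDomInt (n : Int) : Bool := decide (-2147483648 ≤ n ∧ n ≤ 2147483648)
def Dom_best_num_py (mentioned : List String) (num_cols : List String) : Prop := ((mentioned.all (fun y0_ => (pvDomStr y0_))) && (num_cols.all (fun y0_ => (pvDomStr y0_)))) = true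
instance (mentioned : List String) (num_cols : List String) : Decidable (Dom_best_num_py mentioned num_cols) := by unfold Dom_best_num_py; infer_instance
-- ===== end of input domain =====

-- B replaces A's pattern-outer nested rescan by one column-major pass keeping the
-- column of strictly minimal priority rank (alternative decomposition, same cost class).

-- ===== PORT A =====
-- for c in mentioned: if c in num_cols: return c
def aPhase1 : List String → List String → Option String
  | [], _ => none
  | c :: rest, nc => if nc.contains c then some c else aPhase1 rest nc

-- inner loop: for c in num_cols: if p in c.lower(): return c
def aScanCols (p : String) : List String → Option String
  | [] => none
  | c :: rest => if PySem.Str.isIn p (PySem.Str.lower c) then some c else aScanCols p rest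

-- outer loop over the priority patterns
def aPhase2 (nc : List String) : List String → Option String
  | [] => none
  | p :: ps =>
    match aScanCols p nc with
    | some c => some c
    | none => aPhase2 nc ps

def best_num_py (mentioned : List String) (num_cols : List String) : Option String :=
  match aPhase1 mentioned num_cols with
  | some c => some c
  | none =>
    match aPhase2 num_cols ["total_revenue","revenue","sales","profit","amount","price","unit_price","total","value","score","quantity","spending","qty", "units", "sold"] with
    | some c => some c
    | none => num_cols.head?

-- ===== PORT B =====
def pvPriority_alt : List String := ["total_revenue","revenue","sales","profit","amount","price","unit_price","total","value","score","quantity","spending","qty", "units", "sold"]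

-- _rank: smallest priority index whose pattern occurs in low, carried index i
def bRank (low : String) : Nat → List String → Option Nat
  | _, [] => none
  | i, p :: ps => if PySem.Str.isIn p low then some i else bRank low (i + 1) ps

-- phase 1 of B: membership against the set of columns
def bMentioned (present : PySem.Set String) : List String → Option String
  | [] => none
  | c :: rest => if present.contains c then some c else bMentioned present rest

-- single pass over the columns keeping best = (column, rank) with strictly minimal rank
def bLoop : List String → Option (String × Nat) → Option (String × Nat)
  | [], best => best
  | c :: rest, best =>
    match bRank (PySem.Str.lower c) 0 pvPriority_alt with
    | none => bLoop rest best
    | some r =>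
      match best with
      | none => bLoop rest (some (c, r))
      | some (b, br) => if r < br then bLoop rest (some (c, r)) else bLoop rest (some (b, br))

def best_num_py_alt (mentioned : List String) (num_cols : List String) : Option String :=
  match bMentioned (PySem.Set.ofList num_cols) mentioned with
  | some c => some c
  | none =>
    match bLoop num_cols none with
    | some (b, _) => some b
    | none => num_cols.head?

-- ===== PRECONDITION & SPEC =====
def Spec_best_num_py (mentioned : List String) (num_cols : List String) (out : Option String) : Prop := out = best_num_py_alt mentioned num_cols
instance (mentioned : List String) (num_cols : List String) (out : Option String) : Decidable (Spec_best_num_py mentioned num_cols out) := by unfold Spec_best_num_py; infer_instance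

-- ===== CLAIM (what is proved, stated in full; the proofs are below) =====
def Claim_equal_best_num_py : Prop := ∀ (mentioned : List String) (num_cols : List String), Dom_best_num_py mentioned num_cols → Spec_best_num_py mentioned num_cols (best_num_py mentioned num_cols)

-- ===== LEMMAS AND PROOFS =====

-- proof-side: A's phase 2 with the pattern index of the returned column made explicit
def aFindAux (nc : List String) : Nat → List String → Option (String × Nat)
  | _, [] => none
  | i, p :: ps =>
    match aScanCols p nc with
    | some c => some (c, i)
    | none => aFindAux nc (i + 1) ps

-- combine a column's rank with the best result of the remaining columns (column first on ties)
def pvCombine (rk : Option Nat) (c : String) (R : Option (String × Nat)) : Option (String × Nat) :=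
  match rk, R with
  | none, R => R
  | some r, none => some (c, r)
  | some r, some (d, j) => if j < r then some (d, j) else some (c, r)

def pvKeep (R : Option (String × Nat)) (b : String) (br : Nat) : Option (String × Nat) :=
  match R with
  | none => some (b, br)
  | some (d, j) => if j < br then some (d, j) else some (b, br)

theorem combine_some (r : Nat) (c : String) (R : Option (String × Nat)) :
    pvCombine (some r) c R = pvKeep R c r := by
  cases R with
  | none => rfl
  | some dj => obtain ⟨d, j⟩ := dj; rfl

theorem set_contains_eq (nc : List String) (c : String) :
    (PySem.Set.ofList nc).contains c = nc.contains c := by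
  rw [Bool.eq_iff_iff, PySem.Set.contains_iff, PySem.Set.mem_ofList]
  simp

theorem phase1_eq (m nc : List String) : aPhase1 m nc = bMentioned (PySem.Set.ofList nc) m := by
  induction m with
  | nil => rfl
  | cons c rest ih => simp only [aPhase1, bMentioned, ih, set_contains_eq]

theorem aFindAux_map (nc : List String) (pats : List String) :
    ∀ i, aPhase2 nc pats = (aFindAux nc i pats).map Prod.fst := by
  induction pats with
  | nil => intro i; rfl
  | cons p ps ih =>
    intro i
    simp only [aPhase2, aFindAux]
    cases aScanCols p nc with
    | some c => rfl
    | none => exact ih (i + 1)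

theorem aFindAux_ge (nc : List String) (pats : List String) :
    ∀ i d j, aFindAux nc i pats = some (d, j) → i ≤ j := by
  induction pats with
  | nil => intro i d j h; exact absurd h (by simp [aFindAux])
  | cons p ps ih =>
    intro i d j h
    simp only [aFindAux] at h
    cases hscan : aScanCols p nc with
    | some c =>
      rw [hscan] at h
      have : i = j := congrArg Prod.snd (Option.some.inj h)
      omega
    | none =>
      rw [hscan] at h
      have := ih (i + 1) d j h
      omega

theorem bRank_ge (low : String) (pats : List String) :
    ∀ i r, bRank low i pats = some r → i ≤ r := by
  induction pats with
  | nil => intro i r h; exact absurd h (by simp [bRank])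
  | cons p ps ih =>
    intro i r h
    simp only [bRank] at h
    split_ifs at h with hp
    · have : i = r := Option.some.inj h
      omega
    · have := ih (i + 1) r h
      omega

-- A's nested scan decomposed column-by-column
theorem aFindAux_cons (c : String) (rest : List String) (pats : List String) :
    ∀ i, aFindAux (c :: rest) i pats =
      pvCombine (bRank (PySem.Str.lower c) i pats) c (aFindAux rest i pats) := by
  induction pats with
  | nil => intro i; rfl
  | cons p ps ih =>
    intro i
    simp only [aFindAux, aScanCols, bRank]
    by_cases hp : PySem.Str.isIn p (PySem.Str.lower c) = true
    · rw [if_pos hp, if_pos hp]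
      cases hscan : aScanCols p rest with
      | some d => simp [pvCombine]
      | none =>
        cases hrec : aFindAux rest (i + 1) ps with
        | none => simp [pvCombine]
        | some dj =>
          obtain ⟨d, j⟩ := dj
          have := aFindAux_ge rest ps (i + 1) d j hrec
          simp only [pvCombine]
          rw [if_neg (by omega)]
    · rw [if_neg hp, if_neg hp]
      cases hscan : aScanCols p rest with
      | some d =>
        cases hrk : bRank (PySem.Str.lower c) (i + 1) ps with
        | none => simp [pvCombine]
        | some r =>
          have := bRank_ge (PySem.Str.lower c) ps (i + 1) r hrk
          simp only [pvCombine]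
          rw [if_pos (by omega)]
      | none => exact ih (i + 1)

-- running the column loop from an accumulator
theorem bLoop_acc (cs : List String) :
    ∀ b br, bLoop cs (some (b, br)) = pvKeep (bLoop cs none) b br := by
  induction cs with
  | nil => intro b br; rfl
  | cons c rest ih =>
    intro b br
    simp only [bLoop]
    cases hrk : bRank (PySem.Str.lower c) 0 pvPriority_alt with
    | none => exact ih b br
    | some r =>
      show (if r < br then bLoop rest (some (c, r)) else bLoop rest (some (b, br)))
          = pvKeep (bLoop rest (some (c, r))) b br
      rw [ih c r, ih b br]
      cases bLoop rest none with
      | none => simp only [pvKeep]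
      | some dj =>
        obtain ⟨d, j⟩ := dj
        by_cases h1 : j < r
        · simp only [pvKeep, if_pos h1]
          split_ifs <;> first | rfl | omega
        · simp only [pvKeep, if_neg h1]
          split_ifs <;> first | rfl | omega

theorem bLoop_cons (c : String) (rest : List String) :
    bLoop (c :: rest) none =
      pvCombine (bRank (PySem.Str.lower c) 0 pvPriority_alt) c (bLoop rest none) := by
  simp only [bLoop]
  cases hrk : bRank (PySem.Str.lower c) 0 pvPriority_alt with
  | none => rfl
  | some r =>
    show bLoop rest (some (c, r)) = _
    rw [bLoop_acc rest c r, combine_some]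

theorem aFindAux_nil (pats : List String) : ∀ i, aFindAux [] i pats = none := by
  induction pats with
  | nil => intro i; rfl
  | cons p ps ih => intro i; simp only [aFindAux, aScanCols]; exact ih (i + 1)

theorem main_eq (nc : List String) : aFindAux nc 0 pvPriority_alt = bLoop nc none := by
  induction nc with
  | nil => exact aFindAux_nil pvPriority_alt 0
  | cons c rest ih => rw [aFindAux_cons c rest pvPriority_alt 0, ih, bLoop_cons]

-- ===== VERDICT (by name: the statement is the Claim_ definition above) =====
theorem best_num_py_spec : Claim_equal_best_num_py := by
  intro m nc _
  show best_num_py m nc = best_num_py_alt m nc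
  unfold best_num_py best_num_py_alt
  rw [phase1_eq]
  cases bMentioned (PySem.Set.ofList nc) m with
  | some c => rfl
  | none =>
    have hlit : aPhase2 nc ["total_revenue","revenue","sales","profit","amount","price","unit_price","total","value","score","quantity","spending","qty", "units", "sold"] = (bLoop nc none).map Prod.fst := by
      rw [aFindAux_map nc _ 0]
      show (aFindAux nc 0 pvPriority_alt).map Prod.fst = _
      rw [main_eq]
    simp only [hlit]
    cases bLoop nc none with
    | none => rfl
    | some bj => obtain ⟨b, j⟩ := bj; rfl
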